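-- pv_equiv track=rewrite | github.com/liinu-a/tic-tac-toe | src/ai.py | get_table_key
-- ===== SOURCE A (Python) =====
-- def get_table_key(prev_key, player, row, col):
--     """Gets the table key of a game state.
--
--     The key is created by extending the key of the prior game state with a new move.
--
--     Args:
--         prev_key (str): The key of the prior game state.
--         player (str): + or - depending on who made the new move.
--         row (str): The row of the new move.
--         col (str): The column of the new move
--
--     Returns:
--         str: The created key.
--     """
--
--     tb_key = ""
--     for i in range(1, len(prev_key), 5):
--         if prev_key[i:i + 2] == row:
--             for j in range(i + 2, len(prev_key), 5):
--                 if prev_key[j:j + 2] > col or prev_key[j - 2:j] > row: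
--                     break
--                 tb_key += prev_key[j - 3:j + 2]
--             break
--
--         if prev_key[i:i + 2] > row:
--             break
--         tb_key += prev_key[i - 1:i + 4]
--
--     tb_key += player + row + col + prev_key[len(tb_key): ]
--     return tb_key
-- ===== SOURCE B (Python) =====
-- def get_table_key(prev_key, player, row, col):
--     """Single-pass re-implementation: split prev_key into 5-char records, find the
--     insertion index k in two phases (records on earlier rows, then same-row records
--     up to the move's column), and splice player+row+col in at character 5*k."""
--     recs = [prev_key[p:p + 5] for p in range(0, len(prev_key), 5)]
--     k = 0
--     # phase 1: records whose row field sorts strictly before the move's row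
--     while k < len(recs) and len(recs[k]) >= 2 and recs[k][1:3] < row:
--         k += 1
--     # phase 2: we landed on the move's row — keep records not after (row, col)
--     if k < len(recs) and len(recs[k]) >= 2 and recs[k][1:3] == row:
--         while k < len(recs) and len(recs[k]) >= 4 and recs[k][1:3] <= row and recs[k][3:5] <= col:
--             k += 1
--     return prev_key[:5 * k] + player + row + col + prev_key[5 * k:]
-- ===== Notes on version B (the rewrite author's own statement) =====
-- stated objective: alternative
-- what changed: Replaces A's nested character-index loops that accumulate tb_key slice by slice with a split of prev_key into 5-char record chunks, a flat two-phase scan that computes the insertion index k, and a single splice prev_key[:5*k] + player + row + col + prev_key[5*k:].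
import Mathlib
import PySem

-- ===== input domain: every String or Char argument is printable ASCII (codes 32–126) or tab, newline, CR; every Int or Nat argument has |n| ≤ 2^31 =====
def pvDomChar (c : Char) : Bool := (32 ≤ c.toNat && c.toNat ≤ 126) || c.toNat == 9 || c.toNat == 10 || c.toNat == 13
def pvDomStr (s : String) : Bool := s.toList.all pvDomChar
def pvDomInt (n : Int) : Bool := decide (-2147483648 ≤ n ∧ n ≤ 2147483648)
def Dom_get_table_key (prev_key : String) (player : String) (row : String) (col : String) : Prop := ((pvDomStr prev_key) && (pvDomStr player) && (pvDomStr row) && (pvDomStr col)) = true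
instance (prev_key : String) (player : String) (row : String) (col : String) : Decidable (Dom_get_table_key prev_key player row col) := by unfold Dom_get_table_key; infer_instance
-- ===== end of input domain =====

-- B replaces A's nested char-index loops by one chunk split plus a two-phase insertion-index scan (objective: alternative/simpler decomposition; same O(n) cost).

-- ===== PORT A =====
-- shorthand for the Python slice prev_key[a:b] on a char list (exact: PySem.List.slice)
def pvSl (l : List Char) (a b : Int) : List Char := PySem.List.slice l (some a) (some b)

-- the inner 'for j in range(i+2, len(prev_key), 5)' loop with its break, accumulating tb_key
def pvAInner (l row col : List Char) : List Int → List Char → List Char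
  | [], tb => tb
  | j :: js, tb =>
    if col < pvSl l j (j + 2) ∨ row < pvSl l (j - 2) j then tb
    else pvAInner l row col js (tb ++ pvSl l (j - 3) (j + 2))

-- the outer 'for i in range(1, len(prev_key), 5)' loop with its breaks
def pvAOuter (l row col : List Char) : List Int → List Char → List Char
  | [], tb => tb
  | i :: is, tb =>
    if pvSl l i (i + 2) = row then pvAInner l row col (PySem.List.pyRange (i + 2) l.length 5) tb
    else if row < pvSl l i (i + 2) then tb
    else pvAOuter l row col is (tb ++ pvSl l (i - 1) (i + 4))

def get_table_key (prev_key : String) (player : String) (row : String) (col : String) : String :=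
  let l := prev_key.toList
  let tb := pvAOuter l row.toList col.toList (PySem.List.pyRange 1 l.length 5) []
  -- tb_key += player + row + col + prev_key[len(tb_key):]
  String.ofList (tb ++ player.toList ++ row.toList ++ col.toList ++
    PySem.List.slice l (some (tb.length : Int)) none)

-- ===== PORT B =====
-- phase 2: 'while k < len(recs) and len(recs[k]) >= 4 and recs[k][1:3] <= row and recs[k][3:5] <= col'
-- (Python 's <= t' on str is ¬ t < s for the code-point order)
def pvBScan2 (row col : List Char) : List (List Char) → Nat
  | [] => 0
  | r :: rs =>
    if 4 ≤ r.length ∧ ¬ row < pvSl r 1 3 ∧ ¬ col < pvSl r 3 5 then 1 + pvBScan2 row col rs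
    else 0

-- phase 1 followed by the 'if … == row' hand-off to phase 2 (both examine recs[k], the head)
def pvBScan1 (row col : List Char) : List (List Char) → Nat
  | [] => 0
  | r :: rs =>
    if 2 ≤ r.length ∧ pvSl r 1 3 < row then 1 + pvBScan1 row col rs
    else if 2 ≤ r.length ∧ pvSl r 1 3 = row then pvBScan2 row col (r :: rs)
    else 0

def get_table_key_alt (prev_key : String) (player : String) (row : String) (col : String) : String :=
  let l := prev_key.toList
  -- recs = [prev_key[p:p+5] for p in range(0, len(prev_key), 5)]
  let recs := (PySem.List.pyRange 0 l.length 5).map (fun p => PySem.List.slice l (some p) (some (p + 5)))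
  let k := pvBScan1 row.toList col.toList recs
  -- prev_key[:5*k] + player + row + col + prev_key[5*k:]
  String.ofList (PySem.List.slice l none (some ((5 * k : Nat) : Int)) ++ player.toList ++ row.toList ++
    col.toList ++ PySem.List.slice l (some ((5 * k : Nat) : Int)) none)

-- ===== PRECONDITION & SPEC =====
def Spec_get_table_key (prev_key : String) (player : String) (row : String) (col : String) (out : String) : Prop := out = get_table_key_alt prev_key player row col
instance (prev_key : String) (player : String) (row : String) (col : String) (out : String) : Decidable (Spec_get_table_key prev_key player row col out) := by unfold Spec_get_table_key; infer_instance

-- ===== CLAIM (what is proved, stated in full; the proofs are below) =====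
def Claim_equal_get_table_key : Prop := ∀ (prev_key : String) (player : String) (row : String) (col : String), Dom_get_table_key prev_key player row col → Spec_get_table_key prev_key player row col (get_table_key prev_key player row col)

-- ===== LEMMAS AND PROOFS =====

theorem pvRange5_cons (a b : Int) (h : a < b) :
    PySem.List.pyRange a b 5 = a :: PySem.List.pyRange (a + 5) b 5 := by
  rw [PySem.List.pyRange_of_pos _ _ (by norm_num), PySem.List.pyRange_of_pos _ _ (by norm_num)]
  have h1 : (if a < b then ((b - a + 5 - 1) / 5).toNat else 0)
      = (if a + 5 < b then ((b - (a + 5) + 5 - 1) / 5).toNat else 0) + 1 := by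
    split_ifs <;> omega
  rw [h1, List.range_succ_eq_map, List.map_cons, List.map_map]
  refine congrArg₂ _ (by ring) (List.map_congr_left fun k _ => by simp [Function.comp]; ring)

theorem pvRange5_nil (a b : Int) (h : b ≤ a) : PySem.List.pyRange a b 5 = [] := by
  rw [PySem.List.pyRange_of_pos _ _ (by norm_num), if_neg (by omega)]
  simp

theorem pvSl_natCast (l : List Char) (a b : Nat) :
    pvSl l (a : Int) (b : Int) = (l.drop a).take (b - a) := PySem.List.slice_natCast l a b

-- the row field of the chunk starting at 5*k
theorem pvChunkRow (l : List Char) (k : Nat) :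
    pvSl ((l.drop (5 * k)).take 5) 1 3 = (l.drop (5 * k + 1)).take 2 := by
  have h13 : pvSl ((l.drop (5 * k)).take 5) 1 3
      = (((l.drop (5 * k)).take 5).drop 1).take 2 := by
    have := pvSl_natCast ((l.drop (5 * k)).take 5) 1 3; norm_num at this ⊢; exact this
  rw [h13, List.drop_take, List.drop_drop, List.take_take]
  norm_num

-- the col field of the chunk starting at 5*k
theorem pvChunkCol (l : List Char) (k : Nat) :
    pvSl ((l.drop (5 * k)).take 5) 3 5 = (l.drop (5 * k + 3)).take 2 := by
  have h35 : pvSl ((l.drop (5 * k)).take 5) 3 5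
      = (((l.drop (5 * k)).take 5).drop 3).take 2 := by
    have := pvSl_natCast ((l.drop (5 * k)).take 5) 3 5; norm_num at this ⊢; exact this
  rw [h35, List.drop_take, List.drop_drop, List.take_take]
  norm_num

-- the chunk list B scans, starting at position 5*k
def pvRecs (l : List Char) (k : Nat) : List (List Char) :=
  (PySem.List.pyRange ((5 * k : Nat) : Int) l.length 5).map
    (fun p => PySem.List.slice l (some p) (some (p + 5)))

theorem pvRecs_cons (l : List Char) (k : Nat) (h : 5 * k < l.length) :
    pvRecs l k = (l.drop (5 * k)).take 5 :: pvRecs l (k + 1) := by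
  unfold pvRecs
  rw [pvRange5_cons _ _ (by exact_mod_cast h), List.map_cons]
  congr 1
  · rw [show ((5 * k : Nat) : Int) + 5 = ((5 * k + 5 : Nat) : Int) by push_cast; ring]
    have h5 := pvSl_natCast l (5 * k) (5 * k + 5)
    unfold pvSl at h5
    rw [h5, show 5 * k + 5 - 5 * k = 5 by omega]

theorem pvRecs_nil (l : List Char) (k : Nat) (h : l.length ≤ 5 * k) :
    pvRecs l k = [] := by
  unfold pvRecs
  rw [pvRange5_nil _ _ (by exact_mod_cast h)]
  rfl

theorem pvChunk_len (l : List Char) (k : Nat) :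
    ((l.drop (5 * k)).take 5).length = min 5 (l.length - 5 * k) := by
  simp

-- A's inner loop from j = 5*k+3 equals B's phase-2 count over the chunks from 5*k
theorem pvInner_eq (l row col : List Char) :
    ∀ m k tb, l.length - 5 * k = m →
      pvAInner l row col (PySem.List.pyRange ((5 * k + 3 : Nat) : Int) l.length 5) tb
        = tb ++ (l.drop (5 * k)).take (5 * pvBScan2 row col (pvRecs l k)) := by
  intro m
  induction m using Nat.strong_induction_on with
  | _ m ih =>
    intro k tb hm
    by_cases hlt : 5 * k + 3 < l.length
    · -- the loop body runs at least once; the head chunk has length ≥ 4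
      rw [pvRange5_cons _ _ (by exact_mod_cast hlt)]
      rw [pvRecs_cons l k (by omega)]
      have hlen : 4 ≤ ((l.drop (5 * k)).take 5).length := by
        rw [pvChunk_len]; omega
      simp only [pvAInner, pvBScan2]
      rw [show ((5 * k + 3 : Nat) : Int) + 2 = ((5 * k + 5 : Nat) : Int) by push_cast; ring,
        show ((5 * k + 3 : Nat) : Int) - 2 = ((5 * k + 1 : Nat) : Int) by push_cast; ring,
        show ((5 * k + 3 : Nat) : Int) - 3 = ((5 * k : Nat) : Int) by push_cast; ring,
        pvSl_natCast l (5 * k + 3) (5 * k + 5), pvSl_natCast l (5 * k + 1) (5 * k + 3),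
        pvSl_natCast l (5 * k) (5 * k + 5),
        show 5 * k + 5 - (5 * k + 3) = 2 by omega, show 5 * k + 3 - (5 * k + 1) = 2 by omega,
        show 5 * k + 5 - 5 * k = 5 by omega, pvChunkRow, pvChunkCol]
      by_cases hbrk : col < (l.drop (5 * k + 3)).take 2 ∨ row < (l.drop (5 * k + 1)).take 2
      · rw [if_pos hbrk, if_neg (by tauto)]
        simp
      · rw [if_neg hbrk, if_pos ⟨hlen, by tauto, by tauto⟩]
        rw [show ((5 * k + 3 : Nat) : Int) + 5 = ((5 * (k + 1) + 3 : Nat) : Int) by push_cast; ring,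
          ih (l.length - 5 * (k + 1)) (by omega) (k + 1) _ rfl]
        rw [List.append_assoc]
        congr 1
        rw [show 5 * (1 + pvBScan2 row col (pvRecs l (k + 1)))
            = 5 + 5 * pvBScan2 row col (pvRecs l (k + 1)) by ring,
          List.take_add, List.drop_drop]
        congr 2
    · -- the loop range is empty; the head chunk (if any) is shorter than 4
      rw [pvRange5_nil _ _ (by exact_mod_cast (by omega : l.length ≤ 5 * k + 3))]
      by_cases hk : 5 * k < l.length
      · rw [pvRecs_cons l k hk]
        simp only [pvAInner, pvBScan2]
        rw [if_neg (fun h => absurd h.1 (by rw [pvChunk_len]; omega))]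
        simp
      · rw [pvRecs_nil l k (by omega)]
        simp [pvAInner, pvBScan2]

-- A's outer loop from i = 5*k+1 equals B's two-phase count over the chunks from 5*k
theorem pvOuter_eq (l row col : List Char) :
    ∀ m k tb, l.length - 5 * k = m →
      pvAOuter l row col (PySem.List.pyRange ((5 * k + 1 : Nat) : Int) l.length 5) tb
        = tb ++ (l.drop (5 * k)).take (5 * pvBScan1 row col (pvRecs l k)) := by
  intro m
  induction m using Nat.strong_induction_on with
  | _ m ih =>
    intro k tb hm
    by_cases hlt : 5 * k + 1 < l.length
    · rw [pvRange5_cons _ _ (by exact_mod_cast hlt)]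
      rw [pvRecs_cons l k (by omega)]
      have hlen : 2 ≤ ((l.drop (5 * k)).take 5).length := by
        rw [pvChunk_len]; omega
      simp only [pvAOuter, pvBScan1]
      rw [show ((5 * k + 1 : Nat) : Int) + 2 = ((5 * k + 3 : Nat) : Int) by push_cast; ring,
        show ((5 * k + 1 : Nat) : Int) - 1 = ((5 * k : Nat) : Int) by push_cast; ring,
        show ((5 * k + 1 : Nat) : Int) + 4 = ((5 * k + 5 : Nat) : Int) by push_cast; ring,
        pvSl_natCast l (5 * k + 1) (5 * k + 3), pvSl_natCast l (5 * k) (5 * k + 5),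
        show 5 * k + 3 - (5 * k + 1) = 2 by omega, show 5 * k + 5 - 5 * k = 5 by omega,
        pvChunkRow]
      rcases lt_trichotomy ((l.drop (5 * k + 1)).take 2) row with hcmp | hcmp | hcmp
      · -- record row strictly before the move's row: A keeps scanning, B counts 1 + rest
        rw [if_neg (ne_of_lt hcmp), if_neg (lt_asymm hcmp), if_pos ⟨hlen, hcmp⟩]
        rw [show ((5 * k + 1 : Nat) : Int) + 5 = ((5 * (k + 1) + 1 : Nat) : Int) by push_cast; ring,
          ih (l.length - 5 * (k + 1)) (by omega) (k + 1) _ rfl]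
        rw [List.append_assoc]
        congr 1
        rw [show 5 * (1 + pvBScan1 row col (pvRecs l (k + 1)))
            = 5 + 5 * pvBScan1 row col (pvRecs l (k + 1)) by ring,
          List.take_add, List.drop_drop]
        congr 2
      · -- record row equals the move's row: A hands off to the inner loop, B to phase 2
        rw [if_pos hcmp,
          if_neg (by rintro ⟨-, h2⟩; rw [hcmp] at h2; exact lt_irrefl _ h2),
          if_pos ⟨hlen, hcmp⟩]
        rw [pvInner_eq l row col (l.length - 5 * k) k tb rfl, pvRecs_cons l k (by omega)]
      · -- record row after the move's row: both stop
        rw [if_neg (ne_of_gt hcmp), if_pos hcmp,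
          if_neg (fun h => absurd h.2 (lt_asymm hcmp)),
          if_neg (fun h => absurd h.2 (ne_of_gt hcmp))]
        simp
    · rw [pvRange5_nil _ _ (by exact_mod_cast (by omega : l.length ≤ 5 * k + 1))]
      by_cases hk : 5 * k < l.length
      · rw [pvRecs_cons l k hk]
        simp only [pvAOuter, pvBScan1]
        have hsh : ¬ 2 ≤ ((l.drop (5 * k)).take 5).length := by rw [pvChunk_len]; omega
        rw [if_neg (fun h => hsh h.1), if_neg (fun h => hsh h.1)]
        simp
      · rw [pvRecs_nil l k (by omega)]
        simp [pvAOuter, pvBScan1]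

theorem pvDrop_take_len (l : List Char) (n : Nat) :
    l.drop ((l.take n).length) = l.drop n := by
  by_cases h : n ≤ l.length
  · simp [List.length_take, Nat.min_eq_left h]
  · rw [List.length_take]
    rw [List.drop_of_length_le (by omega), List.drop_of_length_le (by omega)]

-- ===== VERDICT (by name: the statement is the Claim_ definition above) =====
theorem get_table_key_spec : Claim_equal_get_table_key := by
  intro prev_key player row col _
  simp only [Spec_get_table_key, get_table_key, get_table_key_alt]
  set l := prev_key.toList with hl
  have h0 : (1 : Int) = ((5 * 0 + 1 : Nat) : Int) := by norm_num
  have houter := pvOuter_eq l row.toList col.toList (l.length - 5 * 0) 0 [] rfl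
  rw [h0, houter]
  have hrecs : pvRecs l 0
      = (PySem.List.pyRange 0 l.length 5).map (fun p => PySem.List.slice l (some p) (some (p + 5))) := by
    unfold pvRecs; norm_num
  rw [hrecs]
  set K := pvBScan1 row.toList col.toList
    ((PySem.List.pyRange 0 l.length 5).map (fun p => PySem.List.slice l (some p) (some (p + 5)))) with hK
  simp only [List.nil_append, Nat.mul_zero, List.drop_zero]
  rw [PySem.List.slice_from_natCast l ((l.take (5 * K)).length), pvDrop_take_len,
    PySem.List.slice_to_natCast l (5 * K), PySem.List.slice_from_natCast l (5 * K)]
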